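-- pv_equiv track=rewrite | github.com/kyrie-eleison/codingTestStudy | ch18 Graph Algorithms/41.py | solution
-- ===== SOURCE A (Python) =====
-- def root_finder(graph, parent, node):
--   if parent[node] != node:
--     parent[node] = root_finder(graph, parent, parent[node])
--
--   return parent[node]
--
-- def union(graph, parent, a, b):
--   rootA = root_finder(graph, parent, a)
--   rootB = root_finder(graph, parent, b)
--
--   if rootA <= rootB:
--     parent[rootB] = rootA
--   else:
--     parent[rootA] = rootB
--
-- def solution(graph, trip):
--
--   n = len(graph)
--   parent = [0]*(n+1)
--
--   for i in range(n):
--     parent[i+1] = i+1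
--
--   for i in range(n):
--     for j in range(n):
--       if graph[i][j] == 1:
--         union(graph, parent, i+1, j+1)
--
--   for i in range(len(trip)-1):
--     a, b = trip[i], trip[i+1]
--     rootA = root_finder(graph, parent, a)
--     rootB = root_finder(graph, parent, b)
--
--     if rootA != rootB:
--       return "No"
--
--   return "Yes"
-- ===== SOURCE B (Python) =====
-- def solution(graph, trip):
--     n = len(graph)
--     # comp[x] = smallest node label in x's connected component (node 0 alone)
--     comp = list(range(n + 1))
--     for i in range(n):
--         row = graph[i]
--         for j in range(n):
--             if row[j] == 1:
--                 a, b = comp[i + 1], comp[j + 1]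
--                 if a != b:
--                     lo, hi = (a, b) if a < b else (b, a)
--                     comp = [lo if c == hi else c for c in comp]
--     for x, y in zip(trip, trip[1:]):
--         if comp[x] != comp[y]:
--             return "No"
--     return "Yes"
-- ===== Notes on version B (the rewrite author's own statement) =====
-- stated objective: alternative
-- what changed: A's recursive path-compressing union-find (parent forest mutated by root_finder/union, roots re-chased during the trip check) is replaced by a flat component-label list merged by relabelling the larger root to the smaller (the same representative A's rootA<=rootB rule yields), so the trip check is plain indexing with no recursion and no mutation.
-- outside the precondition, e.g. on solution([[0, 0], [0, 0]], [1, 2, 5]): A returns 'No', B returns 'No'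
import Mathlib
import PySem

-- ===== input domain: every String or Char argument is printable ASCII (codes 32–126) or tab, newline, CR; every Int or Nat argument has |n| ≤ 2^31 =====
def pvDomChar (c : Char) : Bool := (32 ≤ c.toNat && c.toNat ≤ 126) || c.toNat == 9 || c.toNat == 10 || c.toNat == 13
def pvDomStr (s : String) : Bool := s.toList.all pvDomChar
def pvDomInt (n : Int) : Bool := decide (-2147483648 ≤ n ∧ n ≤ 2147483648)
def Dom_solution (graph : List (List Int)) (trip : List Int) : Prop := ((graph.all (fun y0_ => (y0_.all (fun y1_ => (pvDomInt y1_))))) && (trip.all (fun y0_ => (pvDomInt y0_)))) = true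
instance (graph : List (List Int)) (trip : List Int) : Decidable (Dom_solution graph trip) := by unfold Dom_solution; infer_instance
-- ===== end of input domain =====

-- B replaces A's recursive path-compressing union-find by a flat component-label array
-- merged by relabelling (the smaller label wins, matching A's rootA <= rootB rule) and
-- checked by plain indexing ("alternative": different algorithm, no recursion, no
-- mutation of the label array after the merge phase; not claimed faster).

-- ===== PORT A =====

-- root_finder(graph, parent, node): recursion with path compression; `fuel` only makes
-- the recursion structural (the callers pass parent.length + 2, which the proofs show
-- is never exhausted on admitted inputs); the steps are Python's, step for step.
def rootFinder : Nat → List Int → Int → List Int × Int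
  | 0, parent, node => (parent, node)
  | fuel + 1, parent, node =>
    match PySem.List.pyGet? parent node with
    | none => (parent, node)
    | some p =>
      if p ≠ node then
        let r := rootFinder fuel parent p
        (PySem.List.pySetD r.1 node r.2, r.2)
      else (parent, p)

-- union(graph, parent, a, b)
def unionUF (parent : List Int) (a b : Int) : List Int :=
  let ra := rootFinder (parent.length + 2) parent a
  let rb := rootFinder (ra.1.length + 2) ra.1 b
  if ra.2 ≤ rb.2 then PySem.List.pySetD rb.1 rb.2 ra.2
  else PySem.List.pySetD rb.1 ra.2 rb.2

-- the `for i in range(len(trip)-1)` loop of solution (threads the mutated parent)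
def tripLoopA (parent : List Int) : List Int → String
  | a :: b :: rest =>
    let ra := rootFinder (parent.length + 2) parent a
    let rb := rootFinder (ra.1.length + 2) ra.1 b
    if ra.2 ≠ rb.2 then "No" else tripLoopA rb.1 (b :: rest)
  | _ => "Yes"

def solution (graph : List (List Int)) (trip : List Int) : String :=
  let n := graph.length
  let parent0 := (List.range n).foldl (fun p (i : Nat) => p.set (i + 1) ((i : Int) + 1))
    (List.replicate (n + 1) (0 : Int))
  let parent :=
    (List.range n).foldl (fun p (i : Nat) =>
      (List.range n).foldl (fun p (j : Nat) =>
        match PySem.List.pyGet? ((PySem.List.pyGet? graph (i : Int)).getD []) (j : Int) with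
        | some v => if v = 1 then unionUF p ((i : Int) + 1) ((j : Int) + 1) else p
        | none => p) p) parent0
  tripLoopA parent trip

-- ===== PORT B =====

-- the `for x, y in zip(trip, trip[1:])` loop of Source B (comp is read-only here)
def tripLoopB (comp : List Int) : List Int → String
  | x :: y :: rest =>
    if PySem.List.pyGet? comp x ≠ PySem.List.pyGet? comp y then "No"
    else tripLoopB comp (y :: rest)
  | _ => "Yes"

def solution_alt (graph : List (List Int)) (trip : List Int) : String :=
  let n := graph.length
  let comp :=
    (List.range n).foldl (fun c (i : Nat) =>
      let row := (PySem.List.pyGet? graph (i : Int)).getD []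
      (List.range n).foldl (fun c (j : Nat) =>
        match PySem.List.pyGet? row (j : Int) with
        | some v =>
          if v = 1 then
            let a := (PySem.List.pyGet? c ((i : Int) + 1)).getD 0
            let b := (PySem.List.pyGet? c ((j : Int) + 1)).getD 0
            if a ≠ b then
              let lo := if a < b then a else b
              let hi := if a < b then b else a
              c.map (fun x => if x = hi then lo else x)
            else c
          else c
        | none => c) c)
      ((List.range (n + 1)).map (fun i : Nat => (i : Int)))
  tripLoopB comp trip

-- ===== PRECONDITION & SPEC =====
-- Pre_ excludes exactly the inputs on which the Python A raises IndexError: a row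
-- shorter than n = len(graph) (graph[i][j] fails), or — when the trip has at least
-- two nodes, so that they are indexed at all — a trip node outside [-(n+1), n]
-- (parent[node] fails; Python indexing admits negative wraparound). This is slightly
-- conservative: a trip whose out-of-range node sits after an earlier mismatched pair is
-- excluded too, although A (and B) stop with "No" before indexing it.
def Pre_solution (graph : List (List Int)) (trip : List Int) : Prop :=
  (∀ row ∈ graph, graph.length ≤ row.length) ∧
  (2 ≤ trip.length → ∀ t ∈ trip, -((graph.length : Int) + 1) ≤ t ∧ t ≤ (graph.length : Int))
instance (graph : List (List Int)) (trip : List Int) : Decidable (Pre_solution graph trip) := by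
  unfold Pre_solution; infer_instance

def pvWitness_solution : List (List Int) × List Int :=
  ([[0, 1, 0], [1, 0, 0], [0, 0, 0]], [1, 2, 2, -3])

def Spec_solution (graph : List (List Int)) (trip : List Int) (out : String) : Prop := out = solution_alt graph trip
instance (graph : List (List Int)) (trip : List Int) (out : String) : Decidable (Spec_solution graph trip out) := by unfold Spec_solution; infer_instance

-- ===== CLAIM (what is proved, stated in full; the proofs are below) =====
def Claim_equal_solution : Prop := ∀ (graph : List (List Int)) (trip : List Int), Dom_solution graph trip → Pre_solution graph trip → Spec_solution graph trip (solution graph trip)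

-- ===== LEMMAS AND PROOFS =====

-- value of xs at nat position k (proof-side shorthand for getD)
def gI (xs : List Int) (k : Nat) : Int := xs.getD k 0

-- Coupling invariant between A's parent forest and B's component-label array: same
-- length; entries in range and monotone (≤ their index); comp is constant along
-- parent links and idempotent; parent-roots are comp-fixpoints.
def UFInv (parent comp : List Int) : Prop :=
  parent.length = comp.length ∧
  ∀ k, k < parent.length →
    (0 ≤ gI parent k ∧ gI parent k ≤ (k : Int)) ∧
    (0 ≤ gI comp k ∧ gI comp k ≤ (k : Int)) ∧
    gI comp (gI parent k).toNat = gI comp k ∧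
    gI comp (gI comp k).toNat = gI comp k ∧
    (gI parent k = (k : Int) → gI comp k = (k : Int))

lemma gI_set (xs : List Int) (k : Nat) (v : Int) (m : Nat) :
    gI (xs.set k v) m = if m = k ∧ k < xs.length then v else gI xs m := by
  simp [gI, List.getD, List.getElem?_set]
  split_ifs <;> simp_all

lemma gI_get? (xs : List Int) (k : Nat) (h : k < xs.length) :
    PySem.List.pyGet? xs (k : Int) = some (gI xs k) := by
  rw [PySem.List.pyGet?_natCast]
  simp [gI, List.getD, List.getElem?_eq_getElem h]

lemma rf_spec (k : Nat) : ∀ (fuel : Nat) (parent comp : List Int), UFInv parent comp →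
    k < parent.length → k < fuel →
    (rootFinder fuel parent (k : Int)).2 = gI comp k ∧
    UFInv (rootFinder fuel parent (k : Int)).1 comp ∧
    (rootFinder fuel parent (k : Int)).1.length = parent.length := by
  induction k using Nat.strong_induction_on with
  | _ k ih =>
    intro fuel parent comp hI hk hf
    obtain ⟨hlen, hP⟩ := hI
    obtain ⟨⟨hp0, hp1⟩, ⟨hc0, hc1⟩, hcp, hcc, hfix⟩ := hP k hk
    cases fuel with
    | zero => omega
    | succ fuel =>
      rw [rootFinder, gI_get? parent k hk]; dsimp only
      by_cases hpk : gI parent k = (k : Int)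
      · rw [if_neg (by simp [hpk])]
        exact ⟨hpk.trans (hfix hpk).symm, ⟨hlen, hP⟩, rfl⟩
      · have hplt : (gI parent k).toNat < k := by omega
        have hcast : gI parent k = ((gI parent k).toNat : Int) := by omega
        obtain ⟨hr2, hI1, hlen1⟩ := ih (gI parent k).toNat hplt fuel parent comp ⟨hlen, hP⟩ (by omega) (by omega)
        rw [hcast] at hpk ⊢
        rw [if_pos hpk]
        obtain ⟨hlenR, hPR⟩ := hI1
        refine ⟨hr2.trans hcp, ⟨?_, ?_⟩, ?_⟩
        · rw [PySem.List.pySetD_natCast, List.length_set, hlen1, hlen]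
        · intro m hm
          rw [PySem.List.pySetD_natCast] at hm ⊢
          rw [List.length_set, hlen1] at hm
          have hm' : m < (rootFinder fuel parent ((gI parent k).toNat : Int)).1.length := by
            rw [hlen1]; exact hm
          obtain ⟨⟨hq0, hq1⟩, ⟨hd0, hd1⟩, hdq, hdd, hqfix⟩ := hPR m hm'
          simp only [gI_set, hr2, hcp]
          by_cases hmk : m = k
          · subst hmk
            rw [if_pos ⟨rfl, hm'⟩]
            exact ⟨⟨hc0, hc1⟩, ⟨hc0, hc1⟩, hcc, hcc, fun h => h⟩
          · rw [if_neg (fun h => hmk h.1)]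
            exact ⟨⟨hq0, hq1⟩, ⟨hd0, hd1⟩, hdq, hdd, hqfix⟩
        · rw [PySem.List.pySetD_natCast, List.length_set, hlen1]

lemma pyIdx_neg (n : Nat) (t : Int) (h1 : -(n : Int) ≤ t) (h2 : t < 0) :
    PySem.List.pyIdx? n t = some (((n : Int) + t).toNat) := by
  simp only [PySem.List.pyIdx?, if_neg (by omega : ¬ 0 ≤ t), if_pos h1]
  congr 1
  omega

lemma gI_get?_neg (xs : List Int) (t : Int) (h1 : -(xs.length : Int) ≤ t) (h2 : t < 0) :
    PySem.List.pyGet? xs t = some (gI xs ((xs.length : Int) + t).toNat) := by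
  rw [PySem.List.pyGet?, pyIdx_neg _ _ h1 h2]
  have hj : ((xs.length : Int) + t).toNat < xs.length := by omega
  simp [gI, List.getD, List.getElem?_eq_getElem hj]

lemma pySetD_neg (xs : List Int) (t : Int) (v : Int) (h1 : -(xs.length : Int) ≤ t) (h2 : t < 0) :
    PySem.List.pySetD xs t v = xs.set (((xs.length : Int) + t).toNat) v := by
  rw [PySem.List.pySetD, PySem.List.pySet?, pyIdx_neg _ _ h1 h2]
  rfl

lemma rf_idx (t : Int) (fuel : Nat) (parent comp : List Int) (hI : UFInv parent comp)
    (h1 : -(parent.length : Int) ≤ t) (h2 : t < (parent.length : Int))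
    (hf : parent.length + 2 ≤ fuel) :
    (rootFinder fuel parent t).2 = gI comp (if t < 0 then ((parent.length : Int) + t).toNat else t.toNat) ∧
    UFInv (rootFinder fuel parent t).1 comp ∧
    (rootFinder fuel parent t).1.length = parent.length := by
  by_cases ht : t < 0
  · rw [if_pos ht]
    obtain ⟨hlen, hP⟩ := hI
    set j := ((parent.length : Int) + t).toNat with hjdef
    have hj : j < parent.length := by omega
    obtain ⟨⟨hp0, hp1⟩, ⟨hc0, hc1⟩, hcp, hcc, hfix⟩ := hP j hj
    cases fuel with
    | zero => omega
    | succ fuel =>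
      rw [rootFinder, gI_get?_neg parent t h1 ht]
      dsimp only
      rw [← hjdef]
      rw [if_pos (by omega : gI parent j ≠ t)]
      have hcast : gI parent j = ((gI parent j).toNat : Int) := by omega
      obtain ⟨hr2, hI1, hlen1⟩ := rf_spec (gI parent j).toNat fuel parent comp ⟨hlen, hP⟩ (by omega) (by omega)
      rw [hcast]
      obtain ⟨hlenR, hPR⟩ := hI1
      refine ⟨hr2.trans hcp, ⟨?_, ?_⟩, ?_⟩
      · rw [pySetD_neg _ _ _ (by omega) ht, List.length_set, hlen1, hlen]
      · intro m hm
        rw [pySetD_neg _ _ _ (by omega) ht] at hm ⊢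
        rw [List.length_set, hlen1] at hm
        have hm' : m < (rootFinder fuel parent ((gI parent j).toNat : Int)).1.length := by
          rw [hlen1]; exact hm
        obtain ⟨⟨hq0, hq1⟩, ⟨hd0, hd1⟩, hdq, hdd, hqfix⟩ := hPR m hm'
        have hjj : (((rootFinder fuel parent ((gI parent j).toNat : Int)).1.length : Int) + t).toNat = j := by
          rw [hlen1]
        simp only [hjj, gI_set, hr2, hcp]
        by_cases hmj : m = j
        · subst hmj
          rw [if_pos ⟨rfl, hm'⟩]
          exact ⟨⟨hc0, hc1⟩, ⟨hd0, hd1⟩, hcc, hdd, fun h => h⟩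
        · rw [if_neg (fun h => hmj h.1)]
          exact ⟨⟨hq0, hq1⟩, ⟨hd0, hd1⟩, hdq, hdd, hqfix⟩
      · rw [pySetD_neg _ _ _ (by omega) ht, List.length_set, hlen1]
  · rw [if_neg ht]
    have hcast : t = (t.toNat : Int) := by omega
    rw [hcast]
    exact rf_spec t.toNat fuel parent comp hI (by omega) (by omega)

lemma gI_map_if (comp : List Int) (hi lo : Int) (k : Nat) (hk : k < comp.length) :
    gI (comp.map (fun x => if x = hi then lo else x)) k = if gI comp k = hi then lo else gI comp k := by
  simp [gI, List.getD, List.getElem?_eq_getElem hk, List.getElem?_eq_getElem (by simpa using hk : k < (comp.map (fun x => if x = hi then lo else x)).length)]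

lemma merge_inv (parent comp : List Int) (hI : UFInv parent comp) (lo hi : Int)
    (hlo0 : 0 ≤ lo) (hlohi : lo < hi) (hhi : hi.toNat < parent.length)
    (hclo : gI comp lo.toNat = lo) (hchi : gI comp hi.toNat = hi) :
    UFInv (parent.set hi.toNat lo) (comp.map (fun x => if x = hi then lo else x)) := by
  obtain ⟨hlen, hP⟩ := hI
  constructor
  · simp [hlen]
  · intro m hm
    rw [List.length_set] at hm
    obtain ⟨⟨hq0, hq1⟩, ⟨hd0, hd1⟩, hdq, hdd, hqfix⟩ := hP m hm
    have hmc : m < comp.length := by omega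
    have hlo' : lo.toNat < comp.length := by omega
    have hql : (gI parent m).toNat < comp.length := by omega
    have hdl : (gI comp m).toNat < comp.length := by omega
    rw [gI_set]
    by_cases hmh : m = hi.toNat
    · subst hmh
      rw [if_pos ⟨rfl, hm⟩, gI_map_if _ _ _ _ hmc, hchi, if_pos rfl,
        gI_map_if _ _ _ _ hlo', hclo, if_neg (by omega)]
      exact ⟨⟨hlo0, by omega⟩, ⟨hlo0, by omega⟩, rfl, rfl, fun h => h⟩
    · rw [if_neg (fun h => hmh h.1), gI_map_if _ _ _ _ hmc]
      by_cases hch : gI comp m = hi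
      · rw [if_pos hch, gI_map_if _ _ _ _ hql, hdq, if_pos hch,
          gI_map_if _ _ _ _ hlo', hclo, if_neg (by omega)]
        refine ⟨⟨hq0, hq1⟩, ⟨hlo0, by omega⟩, rfl, rfl, ?_⟩
        intro h
        exfalso
        have := hqfix h
        omega
      · rw [if_neg hch, gI_map_if _ _ _ _ hql, hdq, if_neg hch,
          gI_map_if _ _ _ _ hdl, hdd, if_neg hch]
        exact ⟨⟨hq0, hq1⟩, ⟨hd0, hd1⟩, rfl, rfl, hqfix⟩

lemma union_merge (parent comp : List Int) (a b : Nat) (hI : UFInv parent comp)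
    (ha : a < parent.length) (hb : b < parent.length) :
    UFInv (unionUF parent (a : Int) (b : Int))
        (if gI comp a ≠ gI comp b then
           comp.map (fun x => if x = max (gI comp a) (gI comp b) then min (gI comp a) (gI comp b) else x)
         else comp) ∧
    (unionUF parent (a : Int) (b : Int)).length = parent.length := by
  obtain ⟨hr2a, hIa, hlena⟩ := rf_spec a (parent.length + 2) parent comp hI ha (by omega)
  obtain ⟨hr2b, hIb, hlenb⟩ := rf_spec b ((rootFinder (parent.length + 2) parent (a : Int)).1.length + 2)
    (rootFinder (parent.length + 2) parent (a : Int)).1 comp hIa (by omega) (by omega)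
  rw [unionUF]
  set R := (rootFinder ((rootFinder (parent.length + 2) parent (a : Int)).1.length + 2)
    (rootFinder (parent.length + 2) parent (a : Int)).1 (b : Int)).1 with hR
  have hlenR : R.length = parent.length := by rw [hR, hlenb, hlena]
  obtain ⟨hlen, hP⟩ := hI
  obtain ⟨_, ⟨hca0, hca1⟩, _, hcca, _⟩ := hP a ha
  obtain ⟨_, ⟨hcb0, hcb1⟩, _, hccb, _⟩ := hP b hb
  obtain ⟨hlenRc, hPR⟩ := hIb
  rw [hr2a, hr2b]
  by_cases hxy : gI comp a = gI comp b
  · rw [if_pos (le_of_eq hxy), if_neg (not_not_intro hxy)]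
    rw [PySem.List.pySetD_of_nonneg _ _ hcb0]
    refine ⟨⟨?_, ?_⟩, ?_⟩
    · simpa using hlenRc
    · intro m hm
      rw [List.length_set] at hm
      have hm' : m < R.length := hm
      obtain ⟨⟨hq0, hq1⟩, ⟨hd0, hd1⟩, hdq, hdd, hqfix⟩ := hPR m hm'
      rw [gI_set]
      by_cases hmb : m = (gI comp b).toNat
      · subst hmb
        rw [if_pos ⟨rfl, hm'⟩, hxy]
        have h1 : gI comp (gI comp b).toNat = gI comp b := hccb
        exact ⟨⟨by omega, by omega⟩, ⟨hd0, hd1⟩, rfl, hdd, fun _ => by omega⟩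
      · rw [if_neg (fun h => hmb h.1)]
        exact ⟨⟨hq0, hq1⟩, ⟨hd0, hd1⟩, hdq, hdd, hqfix⟩
    · rw [List.length_set, hlenR]
  · rw [if_pos hxy]
    rcases lt_or_gt_of_ne hxy with hlt | hgt
    · rw [if_pos (le_of_lt hlt), PySem.List.pySetD_of_nonneg _ _ hcb0]
      rw [max_eq_right (le_of_lt hlt), min_eq_left (le_of_lt hlt)]
      refine ⟨merge_inv R comp ⟨by omega, hPR⟩ (gI comp a) (gI comp b) hca0 hlt (by omega) hcca hccb,
        by rw [List.length_set, hlenR]⟩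
    · rw [if_neg (by omega : ¬ gI comp a ≤ gI comp b), PySem.List.pySetD_of_nonneg _ _ hca0]
      rw [max_eq_left (le_of_lt hgt), min_eq_right (le_of_lt hgt)]
      refine ⟨merge_inv R comp ⟨by omega, hPR⟩ (gI comp b) (gI comp a) hcb0 hgt (by omega) hccb hcca,
        by rw [List.length_set, hlenR]⟩

lemma get_comp (comp : List Int) (t : Int) (h1 : -(comp.length : Int) ≤ t) (h2 : t < (comp.length : Int)) :
    PySem.List.pyGet? comp t =
      some (gI comp (if t < 0 then ((comp.length : Int) + t).toNat else t.toNat)) := by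
  by_cases ht : t < 0
  · rw [if_pos ht]; exact gI_get?_neg comp t h1 ht
  · rw [if_neg ht]
    have hcast : t = (t.toNat : Int) := by omega
    rw [hcast]
    exact gI_get? comp t.toNat (by omega)

lemma trip_loop_eq : ∀ (trip : List Int) (parent comp : List Int), UFInv parent comp →
    (∀ t ∈ trip, -(parent.length : Int) ≤ t ∧ t < (parent.length : Int)) →
    tripLoopA parent trip = tripLoopB comp trip := by
  intro trip
  induction trip with
  | nil => intro parent comp _ _; rfl
  | cons a rest ih =>
    intro parent comp hI hT
    cases rest with
    | nil => rfl
    | cons b rest' =>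
      have hlen : parent.length = comp.length := hI.1
      obtain ⟨ha1, ha2⟩ := hT a (by simp)
      obtain ⟨hb1, hb2⟩ := hT b (by simp)
      obtain ⟨hra, hIa, hlena⟩ := rf_idx a (parent.length + 2) parent comp hI ha1 ha2 (by omega)
      obtain ⟨hrb, hIb, hlenb⟩ := rf_idx b ((rootFinder (parent.length + 2) parent a).1.length + 2)
        (rootFinder (parent.length + 2) parent a).1 comp hIa (by omega) (by omega) (by omega)
      rw [hlena] at hrb hIb hlenb
      rw [tripLoopA, tripLoopB]
      rw [hlena]
      rw [hra, hrb, get_comp comp a (by omega) (by omega), get_comp comp b (by omega) (by omega), ← hlen]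
      by_cases hne : gI comp (if a < 0 then ((parent.length : Int) + a).toNat else a.toNat) =
          gI comp (if b < 0 then ((parent.length : Int) + b).toNat else b.toNat)
      · rw [if_neg (by simp [hne]), if_neg (by simp [hne])]
        exact ih _ comp hIb (by intro t ht; rw [hlenb]; exact hT t (by simp [ht]))
      · rw [if_pos (by simp [hne]), if_pos (by simp [hne])]

lemma foldl_rel (R : List Int → List Int → Prop) (f g : List Int → Nat → List Int) :
    ∀ (l : List Nat) (a b : List Int), R a b →
      (∀ a b x, x ∈ l → R a b → R (f a x) (g b x)) → R (l.foldl f a) (l.foldl g b) := by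
  intro l
  induction l with
  | nil => intro a b h _; exact h
  | cons x xs ih =>
    intro a b h hstep
    exact ih (f a x) (g b x) (hstep a b x (by simp) h)
      (fun a b y hy hr => hstep a b y (by simp [hy]) hr)

lemma init_fold (m : Nat) : ∀ (p : List Int),
    (((List.range m).foldl (fun p (i : Nat) => p.set (i + 1) ((i : Int) + 1)) p).length = p.length) ∧
    (∀ k, gI ((List.range m).foldl (fun p (i : Nat) => p.set (i + 1) ((i : Int) + 1)) p) k =
      if 1 ≤ k ∧ k ≤ m ∧ k < p.length then (k : Int) else gI p k) := by
  induction m with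
  | zero => intro p; exact ⟨rfl, fun k => by rw [if_neg (by omega)]; rfl⟩
  | succ m ih =>
    intro p
    rw [List.range_succ, List.foldl_append]
    obtain ⟨ihl, ihg⟩ := ih p
    dsimp only [List.foldl]
    constructor
    · rw [List.length_set, ihl]
    · intro k
      rw [gI_set, ihg, ihl]
      split_ifs with h1 h2 h3 <;> first
        | rfl
        | omega

lemma inner_step (row : List Int) (i j n : Nat) (hi : i < n) (hj : j < n) (p c : List Int)
    (hI : UFInv p c) (hlen : p.length = n + 1) :
    UFInv
      (match PySem.List.pyGet? row (j : Int) with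
       | some v => if v = 1 then unionUF p ((i : Int) + 1) ((j : Int) + 1) else p
       | none => p)
      (match PySem.List.pyGet? row (j : Int) with
       | some v =>
         if v = 1 then
           let a := (PySem.List.pyGet? c ((i : Int) + 1)).getD 0
           let b := (PySem.List.pyGet? c ((j : Int) + 1)).getD 0
           if a ≠ b then
             let lo := if a < b then a else b
             let hi := if a < b then b else a
             c.map (fun x => if x = hi then lo else x)
           else c
         else c
       | none => c) ∧
    (match PySem.List.pyGet? row (j : Int) with
     | some v => if v = 1 then unionUF p ((i : Int) + 1) ((j : Int) + 1) else p
     | none => p).length = n + 1 := by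
  have hclen : p.length = c.length := hI.1
  cases hv : PySem.List.pyGet? row (j : Int) with
  | none => exact ⟨hI, hlen⟩
  | some v =>
    dsimp only
    by_cases hv1 : v = 1
    · rw [if_pos hv1, if_pos hv1]
      have hia : ((i : Int) + 1) = (((i + 1 : Nat)) : Int) := by push_cast; ring
      have hja : ((j : Int) + 1) = (((j + 1 : Nat)) : Int) := by push_cast; ring
      rw [hia, hja, gI_get? c (i + 1) (by omega), gI_get? c (j + 1) (by omega)]
      dsimp only [Option.getD]
      obtain ⟨hU, hL⟩ := union_merge p c (i + 1) (j + 1) hI (by omega) (by omega)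
      refine ⟨?_, by rw [hL, hlen]⟩
      by_cases hxy : gI c (i + 1) = gI c (j + 1)
      · rw [if_neg (not_not_intro hxy)]
        rw [if_neg (not_not_intro hxy)] at hU
        exact hU
      · rw [if_pos hxy]
        rw [if_pos hxy] at hU
        convert hU using 3
        split_ifs <;> omega
    · rw [if_neg hv1, if_neg hv1]
      exact ⟨hI, hlen⟩

lemma gI_comp0 (m k : Nat) (hk : k < m) : gI ((List.range m).map (fun i : Nat => (i : Int))) k = k := by
  exact PySem.List.getD_map_range (fun i => (i : Int)) m k 0 hk

lemma init_inv (n : Nat) :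
    UFInv ((List.range n).foldl (fun p (i : Nat) => p.set (i + 1) ((i : Int) + 1)) (List.replicate (n + 1) (0 : Int)))
          ((List.range (n + 1)).map (fun i : Nat => (i : Int))) ∧
    ((List.range n).foldl (fun p (i : Nat) => p.set (i + 1) ((i : Int) + 1)) (List.replicate (n + 1) (0 : Int))).length = n + 1 := by
  obtain ⟨hl, hg⟩ := init_fold n (List.replicate (n + 1) (0 : Int))
  rw [List.length_replicate] at hl hg
  have hval : ∀ k, k < n + 1 → gI ((List.range n).foldl (fun p (i : Nat) => p.set (i + 1) ((i : Int) + 1)) (List.replicate (n + 1) (0 : Int))) k = k := by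
    intro k hk
    rw [hg]
    split_ifs with h
    · rfl
    · have hk0 : k = 0 := by omega
      subst hk0
      simp [gI, List.getD]
  refine ⟨⟨by simp [hl], ?_⟩, hl⟩
  intro k hk
  rw [hl] at hk
  have hc : gI ((List.range (n + 1)).map (fun i : Nat => (i : Int))) k = k := gI_comp0 (n + 1) k hk
  refine ⟨⟨by rw [hval k hk]; omega, by rw [hval k hk]⟩, ⟨by rw [hc]; omega, by rw [hc]⟩, ?_, ?_, fun _ => hc⟩
  · rw [hval k hk, Int.toNat_natCast]
  · rw [hc, Int.toNat_natCast]
    exact hc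

lemma solution_eq_alt (graph : List (List Int)) (trip : List Int)
    (_hrows : ∀ row ∈ graph, graph.length ≤ row.length)
    (htrip : 2 ≤ trip.length → ∀ t ∈ trip, -((graph.length : Int) + 1) ≤ t ∧ t ≤ (graph.length : Int)) :
    solution graph trip = solution_alt graph trip := by
  match trip with
  | [] => rw [solution, solution_alt]; rfl
  | [t] => rw [solution, solution_alt]; rfl
  | a :: b :: rest =>
  have htrip := htrip (by simp)
  rw [solution, solution_alt]
  obtain ⟨hinit, hlen0⟩ := init_inv graph.length
  have hfold := foldl_rel (fun p c => UFInv p c ∧ p.length = graph.length + 1)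
    (fun p (i : Nat) =>
      (List.range graph.length).foldl (fun p (j : Nat) =>
        match PySem.List.pyGet? ((PySem.List.pyGet? graph (i : Int)).getD []) (j : Int) with
        | some v => if v = 1 then unionUF p ((i : Int) + 1) ((j : Int) + 1) else p
        | none => p) p)
    (fun c (i : Nat) =>
      (List.range graph.length).foldl (fun c (j : Nat) =>
        match PySem.List.pyGet? ((PySem.List.pyGet? graph (i : Int)).getD []) (j : Int) with
        | some v =>
          if v = 1 then
            let a := (PySem.List.pyGet? c ((i : Int) + 1)).getD 0
            let b := (PySem.List.pyGet? c ((j : Int) + 1)).getD 0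
            if a ≠ b then
              let lo := if a < b then a else b
              let hi := if a < b then b else a
              c.map (fun x => if x = hi then lo else x)
            else c
          else c
        | none => c) c)
    (List.range graph.length) _ _ ⟨hinit, hlen0⟩ ?_
  · exact trip_loop_eq (a :: b :: rest) _ _ hfold.1
      (by
        intro t ht
        obtain ⟨h1, h2⟩ := htrip t ht
        rw [hfold.2]
        constructor <;> push_cast <;> omega)
  · intro p c i hi ⟨hI, hlen⟩
    have hi' : i < graph.length := List.mem_range.mp hi
    exact foldl_rel (fun p c => UFInv p c ∧ p.length = graph.length + 1) _ _
      (List.range graph.length) p c ⟨hI, hlen⟩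
      (fun p c j hj ⟨hI, hlen⟩ =>
        inner_step ((PySem.List.pyGet? graph (i : Int)).getD []) i j graph.length hi'
          (List.mem_range.mp hj) p c hI hlen)

-- ===== VERDICT (by name: the statement is the Claim_ definition above) =====
theorem solution_spec : Claim_equal_solution := by
  intro graph trip _hdom hpre
  unfold Spec_solution
  exact solution_eq_alt graph trip hpre.1 hpre.2
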